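-- pv_equiv track=rewrite | github.com/ICCB-Cologne/CNSistent | cns/process/breakpoints.py | get_breaks_inside_segments
-- ===== SOURCE A (Python) =====
-- def get_breaks_inside_segments(segs, breaks, min_dist = 0):
--     res = { chrom: [] for chrom in breaks }
--     for chrom, chrom_segs in segs.items():
--         if chrom not in breaks:
--             continue
--         for seg in chrom_segs:
--             for br in breaks[chrom]:
--                 if seg[0] + min_dist <= br < seg[1] - min_dist:
--                     res[chrom].append(br)
--     return res
-- ===== SOURCE B (Python) =====
-- def get_breaks_inside_segments(segs, breaks, min_dist = 0):
--     res = {}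
--     for chrom, blist in breaks.items():
--         pairs = sorted(zip(blist, range(len(blist))), key=lambda q: q[0])
--         vals = [q[0] for q in pairs]
--         out = []
--         for seg in segs.get(chrom, []):
--             l = _bisect_left(vals, seg[0] + min_dist)
--             r = _bisect_left(vals, seg[1] - min_dist)
--             sel = sorted(pairs[l:r], key=lambda q: q[1])
--             out += [q[0] for q in sel]
--         res[chrom] = out
--     return res
--
-- def _bisect_left(a, x):
--     lo, hi = 0, len(a)
--     while lo < hi:
--         mid = (lo + hi) // 2
--         if a[mid] < x:
--             lo = mid + 1
--         else:
--             hi = mid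
--     return lo
-- ===== Notes on version B (the rewrite author's own statement) =====
-- stated objective: alternative
-- what changed: Instead of scanning every break for every segment, B sorts each chromosome's breaks once together with their positions, binary-searches the two segment bounds, and re-sorts the selected slice by original position to reproduce A's output order; it trades A's per-segment linear scan for sort-plus-bisect bookkeeping.
import Mathlib
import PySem

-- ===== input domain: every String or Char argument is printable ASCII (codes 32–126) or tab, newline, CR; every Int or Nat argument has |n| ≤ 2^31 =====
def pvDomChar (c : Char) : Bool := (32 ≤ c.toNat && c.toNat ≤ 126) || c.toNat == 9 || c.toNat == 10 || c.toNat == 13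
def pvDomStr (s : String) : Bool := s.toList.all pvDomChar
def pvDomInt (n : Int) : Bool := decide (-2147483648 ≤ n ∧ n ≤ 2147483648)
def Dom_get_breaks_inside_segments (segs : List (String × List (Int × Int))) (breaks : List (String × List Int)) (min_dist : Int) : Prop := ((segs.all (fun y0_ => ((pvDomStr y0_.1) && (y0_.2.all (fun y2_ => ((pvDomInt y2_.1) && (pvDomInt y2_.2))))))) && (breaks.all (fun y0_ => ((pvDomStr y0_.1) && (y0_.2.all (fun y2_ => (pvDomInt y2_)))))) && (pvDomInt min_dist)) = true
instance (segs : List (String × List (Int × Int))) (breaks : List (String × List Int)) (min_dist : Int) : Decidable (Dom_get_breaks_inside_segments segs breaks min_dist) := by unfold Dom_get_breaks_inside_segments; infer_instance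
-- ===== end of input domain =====

-- B replaces A's inner scan of all breaks per segment by a sorted copy of the breaks with
-- their positions plus a hand-written binary search per segment bound (objective: alternative).

-- ===== PORT A =====
-- dicts are assoc lists here; under Pre_ (unique keys) `PySem.Dict.mk` is exactly the Python dict
def get_breaks_inside_segments (segs : List (String × List (Int × Int))) (breaks : List (String × List Int)) (min_dist : Int) : List (String × List Int) :=
  let bd : PySem.Dict String (List Int) := PySem.Dict.mk breaks
  -- res = { chrom: [] for chrom in breaks }
  let res0 : PySem.Dict String (List Int) :=
    breaks.foldl (fun d p => d.insert p.1 ([] : List Int)) PySem.Dict.empty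
  let res :=
    segs.foldl (fun res p =>
      if bd.contains p.1 then
        p.2.foldl (fun res seg =>
          -- breaks[chrom]: contains was just checked, so getD with default [] is exact
          (bd.getD p.1 []).foldl (fun res br =>
            if seg.1 + min_dist ≤ br ∧ br < seg.2 - min_dist then
              res.modify p.1 [] (fun v => v ++ [br])   -- res[chrom].append(br)
            else res) res) res
      else res) res0
  res.items

-- ===== PORT B =====
-- the hand-written bisect_left loop from Source B (a[mid] is always in range, so getD is exact)
def bisectLeftLoop (a : List Int) (x : Int) (lo hi : Nat) : Nat :=
  if h : lo < hi then
    let mid := (lo + hi) / 2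
    if a.getD mid 0 < x then bisectLeftLoop a x (mid + 1) hi
    else bisectLeftLoop a x lo mid
  else lo
termination_by hi - lo
decreasing_by all_goals omega

def get_breaks_inside_segments_alt (segs : List (String × List (Int × Int))) (breaks : List (String × List Int)) (min_dist : Int) : List (String × List Int) :=
  let sd : PySem.Dict String (List (Int × Int)) := PySem.Dict.mk segs
  let res :=
    breaks.foldl (fun res p =>
      let pairs := PySem.List.sorted (p.2.zip (PySem.List.pyRange 0 (p.2.length : Int))) (fun q => q.1)
      let vals := pairs.map (fun q => q.1)
      let out :=
        (sd.getD p.1 []).foldl (fun out seg =>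
          let l := bisectLeftLoop vals (seg.1 + min_dist) 0 vals.length
          let r := bisectLeftLoop vals (seg.2 - min_dist) 0 vals.length
          let sel := PySem.List.sorted (PySem.List.slice pairs (some (l : Int)) (some (r : Int))) (fun q => q.2)
          out ++ sel.map (fun q => q.1)) []
      res.insert p.1 out) PySem.Dict.empty
  res.items

-- ===== PRECONDITION & SPEC =====
-- Pre_ restricts the assoc-list encoding to actual Python dicts: segs and breaks are dicts
-- in A, and a Python dict cannot carry two entries with the same key.
def Pre_get_breaks_inside_segments (segs : List (String × List (Int × Int))) (breaks : List (String × List Int)) (min_dist : Int) : Prop :=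
  (segs.map Prod.fst).Nodup ∧ (breaks.map Prod.fst).Nodup
instance (segs : List (String × List (Int × Int))) (breaks : List (String × List Int)) (min_dist : Int) : Decidable (Pre_get_breaks_inside_segments segs breaks min_dist) := by unfold Pre_get_breaks_inside_segments; infer_instance

def pvWitness_get_breaks_inside_segments : (List (String × List (Int × Int))) × (List (String × List Int)) × Int :=
  ([("1", [(0, 10)]), ("2", [(5, 9)])], [("1", [7, 2, 7]), ("3", [4])], 1)

def Spec_get_breaks_inside_segments (segs : List (String × List (Int × Int))) (breaks : List (String × List Int)) (min_dist : Int) (out : List (String × List Int)) : Prop := out = get_breaks_inside_segments_alt segs breaks min_dist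
instance (segs : List (String × List (Int × Int))) (breaks : List (String × List Int)) (min_dist : Int) (out : List (String × List Int)) : Decidable (Spec_get_breaks_inside_segments segs breaks min_dist out) := by unfold Spec_get_breaks_inside_segments; infer_instance

-- ===== CLAIM (what is proved, stated in full; the proofs are below) =====
def Claim_equal_get_breaks_inside_segments : Prop := ∀ (segs : List (String × List (Int × Int))) (breaks : List (String × List Int)) (min_dist : Int), Dom_get_breaks_inside_segments segs breaks min_dist → Pre_get_breaks_inside_segments segs breaks min_dist → Spec_get_breaks_inside_segments segs breaks min_dist (get_breaks_inside_segments segs breaks min_dist)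

-- ===== LEMMAS AND PROOFS =====

-- In a ≤-sorted list, the elements below x are exactly the first countP-many.
theorem pv_countP_lt_char (a : List Int) (x : Int) (hs : a.Pairwise (· ≤ ·)) (i : Nat) (h : i < a.length) :
    (a[i] < x ↔ i < a.countP (fun v => decide (v < x))) := by
  induction a generalizing i with
  | nil => simp at h
  | cons y t ih =>
    rcases List.pairwise_cons.mp hs with ⟨hy, ht⟩
    cases i with
    | zero =>
      simp only [List.getElem_cons_zero, List.countP_cons]
      by_cases hyx : y < x
      · constructor
        · intro _; have : (decide (y < x)) = true := by simpa using hyx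
          simp [this]
        · intro _; exact hyx
      · have h0 : t.countP (fun v => decide (v < x)) = 0 := by
          rw [List.countP_eq_zero]
          intro z hz
          simp only [decide_eq_true_eq]
          have := hy z hz
          omega
        simp [hyx, h0]
    | succ j =>
      simp only [List.getElem_cons_succ, List.countP_cons]
      by_cases hyx : y < x
      · rw [ih ht j (by simpa using h)]
        simp [hyx]
      · have h0 : t.countP (fun v => decide (v < x)) = 0 := by
          rw [List.countP_eq_zero]
          intro z hz
          simp only [decide_eq_true_eq]
          have := hy z hz
          omega
        have hj : j < t.length := by simpa using h
        have hz : ¬ t[j] < x := by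
          have := hy _ (List.getElem_mem hj)
          omega
        simp [hyx, h0, hz]

-- the hand-written binary search returns the number of elements below x
theorem pv_bisect_loop_eq (a : List Int) (x : Int) (hs : a.Pairwise (· ≤ ·)) :
    ∀ n lo hi, hi - lo ≤ n → hi ≤ a.length →
      lo ≤ a.countP (fun v => decide (v < x)) → a.countP (fun v => decide (v < x)) ≤ hi →
      bisectLeftLoop a x lo hi = a.countP (fun v => decide (v < x)) := by
  intro n
  induction n with
  | zero =>
    intro lo hi h1 h2 h3 h4
    rw [bisectLeftLoop]
    have : ¬ lo < hi := by omega
    simp [this]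
    omega
  | succ m ih =>
    intro lo hi h1 h2 h3 h4
    rw [bisectLeftLoop]
    by_cases hlt : lo < hi
    · simp only [hlt, dif_pos]
      have hmlen : (lo + hi) / 2 < a.length := by omega
      have hget : a.getD ((lo + hi) / 2) 0 = a[(lo + hi) / 2] := List.getD_eq_getElem a 0 hmlen
      rw [hget]
      have hchar := pv_countP_lt_char a x hs ((lo + hi) / 2) hmlen
      by_cases hc : a[(lo + hi) / 2] < x
      · simp only [hc, if_pos]
        exact ih ((lo + hi) / 2 + 1) hi (by omega) h2 (by omega) h4
      · simp only [hc, if_false]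
        have : a.countP (fun v => decide (v < x)) ≤ (lo + hi) / 2 := by
          rw [hchar] at hc; omega
        exact ih lo ((lo + hi) / 2) (by omega) (by omega) h3 this
    · simp [hlt]; omega

-- slicing a fst-sorted pair list between the two bisection points filters the value band
theorem pv_take_drop_countP (x1 x2 : Int) :
    ∀ (ps : List (Int × Int)), ps.Pairwise (fun a b => a.1 ≤ b.1) →
      List.take (ps.countP (fun q => decide (q.1 < x2)) - ps.countP (fun q => decide (q.1 < x1)))
        (List.drop (ps.countP (fun q => decide (q.1 < x1))) ps)
      = ps.filter (fun q => decide (x1 ≤ q.1 ∧ q.1 < x2)) := by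
  intro ps hps
  induction ps with
  | nil => simp
  | cons y t ih =>
    rcases List.pairwise_cons.mp hps with ⟨hy, ht⟩
    have iht := ih ht
    by_cases h1 : y.1 < x1
    · by_cases h2 : y.1 < x2
      · have e1 : (y :: t).countP (fun q => decide (q.1 < x1)) = t.countP (fun q => decide (q.1 < x1)) + 1 := by
          simp [h1]
        have e2 : (y :: t).countP (fun q => decide (q.1 < x2)) = t.countP (fun q => decide (q.1 < x2)) + 1 := by
          simp [h2]
        rw [e1, e2, List.filter_cons_of_neg (by simp; omega)]
        simpa using iht
      · have e2 : (y :: t).countP (fun q => decide (q.1 < x2)) = 0 := by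
          rw [List.countP_eq_zero]
          intro z hz
          simp only [List.mem_cons] at hz
          rcases hz with rfl | hz
          · simp; omega
          · have := hy z hz; simp; omega
        rw [e2]
        simp only [Nat.zero_sub, List.take_zero]
        symm
        rw [List.filter_eq_nil_iff]
        intro z hz
        simp only [List.mem_cons] at hz
        rcases hz with rfl | hz
        · simp; omega
        · have := hy z hz; simp; omega
    · have e1 : (y :: t).countP (fun q => decide (q.1 < x1)) = 0 := by
        rw [List.countP_eq_zero]
        intro z hz
        simp only [List.mem_cons] at hz
        rcases hz with rfl | hz
        · simp; omega
        · have := hy z hz; simp; omega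
      have e1t : t.countP (fun q => decide (q.1 < x1)) = 0 := by
        rw [List.countP_eq_zero]
        intro z hz
        have := hy z hz; simp; omega
      by_cases h2 : y.1 < x2
      · have e2 : (y :: t).countP (fun q => decide (q.1 < x2)) = t.countP (fun q => decide (q.1 < x2)) + 1 := by
          simp [h2]
        rw [e1, e2, List.drop_zero, List.filter_cons_of_pos (by simp; omega)]
        simp only [Nat.sub_zero]
        rw [List.take_succ_cons]
        rw [e1t] at iht
        simp only [List.drop_zero, Nat.sub_zero] at iht
        rw [iht]
      · have e2 : (y :: t).countP (fun q => decide (q.1 < x2)) = 0 := by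
          rw [List.countP_eq_zero]
          intro z hz
          simp only [List.mem_cons] at hz
          rcases hz with rfl | hz
          · simp; omega
          · have := hy z hz; simp; omega
        rw [e1, e2]
        simp only [Nat.zero_sub, List.take_zero]
        symm
        rw [List.filter_eq_nil_iff]
        intro z hz
        simp only [List.mem_cons] at hz
        rcases hz with rfl | hz
        · simp; omega
        · have := hy z hz; simp; omega

theorem pv_zip_snd_lt {α : Type} : ∀ (xs : List α) (ys : List Int), ys.Pairwise (· < ·) →
    (xs.zip ys).Pairwise (fun a b => a.2 < b.2) := by
  intro xs
  induction xs with
  | nil => intro ys _; simp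
  | cons x xs ih =>
    intro ys hys
    cases ys with
    | nil => simp
    | cons y ys =>
      rcases List.pairwise_cons.mp hys with ⟨hy, hys'⟩
      rw [List.zip_cons_cons, List.pairwise_cons]
      refine ⟨?_, ih ys hys'⟩
      intro z hz
      have : z.2 ∈ ys := by
        rcases z with ⟨z1, z2⟩
        exact (List.of_mem_zip hz).2
      exact hy _ this

theorem pv_zip_filter_map_fst (q : Int → Bool) :
    ∀ (bl ys : List Int), bl.length ≤ ys.length →
      ((bl.zip ys).filter (fun p => q p.1)).map Prod.fst = bl.filter q := by
  intro bl
  induction bl with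
  | nil => intro ys _; simp
  | cons b bl ih =>
    intro ys hlen
    cases ys with
    | nil => simp at hlen
    | cons y ys =>
      rw [List.zip_cons_cons]
      by_cases hq : q b
      · rw [List.filter_cons_of_pos (by simpa using hq), List.filter_cons_of_pos hq, List.map_cons]
        rw [ih ys (by simpa using hlen)]
      · rw [List.filter_cons_of_neg (by simpa using hq), List.filter_cons_of_neg hq]
        exact ih ys (by simpa using hlen)

-- one segment of B: bisect + slice + re-sort by original position = order-preserving filter
theorem pv_sel_eq (bl : List Int) (x1 x2 : Int) :
    (PySem.List.sorted
        (PySem.List.slice (PySem.List.sorted (bl.zip (PySem.List.pyRange 0 (bl.length : Int))) (fun q => q.1))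
          (some ((bisectLeftLoop ((PySem.List.sorted (bl.zip (PySem.List.pyRange 0 (bl.length : Int))) (fun q => q.1)).map (fun q => q.1)) x1 0 ((PySem.List.sorted (bl.zip (PySem.List.pyRange 0 (bl.length : Int))) (fun q => q.1)).map (fun q => q.1)).length : Nat) : Int))
          (some ((bisectLeftLoop ((PySem.List.sorted (bl.zip (PySem.List.pyRange 0 (bl.length : Int))) (fun q => q.1)).map (fun q => q.1)) x2 0 ((PySem.List.sorted (bl.zip (PySem.List.pyRange 0 (bl.length : Int))) (fun q => q.1)).map (fun q => q.1)).length : Nat) : Int)))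
        (fun q => q.2)).map (fun q => q.1)
    = bl.filter (fun b => decide (x1 ≤ b ∧ b < x2)) := by
  set Z := bl.zip (PySem.List.pyRange 0 (bl.length : Int)) with hZ
  set pairs := PySem.List.sorted Z (fun q => q.1) with hpairs
  set vals := pairs.map (fun q => q.1) with hvals
  have hZlt : Z.Pairwise (fun a b => a.2 < b.2) := by
    apply pv_zip_snd_lt
    rw [PySem.List.pyRange_zero_natCast]
    exact (List.pairwise_lt_range).map _ (fun a b h => by exact_mod_cast h)
  have hvs : vals.Pairwise (· ≤ ·) := PySem.List.sorted_map_key_pairwise Z (fun q => q.1)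
  have hps : pairs.Pairwise (fun a b => a.1 ≤ b.1) := PySem.List.sorted_pairwise Z (fun q => q.1)
  have hcnt : ∀ x : Int, vals.countP (fun v => decide (v < x)) = pairs.countP (fun q => decide (q.1 < x)) := by
    intro x
    rw [hvals, List.countP_map]
    rfl
  have hbis : ∀ x : Int, bisectLeftLoop vals x 0 vals.length = pairs.countP (fun q => decide (q.1 < x)) := by
    intro x
    rw [← hcnt]
    exact pv_bisect_loop_eq vals x hvs vals.length 0 vals.length (by omega) (le_refl _)
      (by omega) List.countP_le_length
  rw [hbis x1, hbis x2, PySem.List.slice_natCast,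
    pv_take_drop_countP x1 x2 pairs hps]
  have hperm : (Z.filter (fun q => decide (x1 ≤ q.1 ∧ q.1 < x2))).Perm
      (pairs.filter (fun q => decide (x1 ≤ q.1 ∧ q.1 < x2))) :=
    ((PySem.List.sorted_perm Z (fun q => q.1) false).symm).filter _
  rw [PySem.List.sorted_eq_of_perm_of_pairwise_lt _ _ (fun q => q.2) hperm (hZlt.filter _)]
  have hlen : bl.length ≤ (PySem.List.pyRange 0 (bl.length : Int)).length := by
    rw [PySem.List.pyRange_zero_natCast]
    simp
  exact pv_zip_filter_map_fst (fun b => decide (x1 ≤ b ∧ b < x2)) bl _ hlen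

-- A's innermost loop: appending the breaks of one segment into res[c]
theorem pv_inner1 (c : String) (md : Int) (seg : Int × Int) :
    ∀ (bl : List Int) (d : PySem.Dict String (List Int)), c ∈ d.keys →
      ((bl.foldl (fun r br => if seg.1 + md ≤ br ∧ br < seg.2 - md then r.modify c [] (fun v => v ++ [br]) else r) d).keys = d.keys
      ∧ ∀ c', (bl.foldl (fun r br => if seg.1 + md ≤ br ∧ br < seg.2 - md then r.modify c [] (fun v => v ++ [br]) else r) d).getD c' []
          = if c' = c then d.getD c [] ++ bl.filter (fun br => decide (seg.1 + md ≤ br ∧ br < seg.2 - md)) else d.getD c' []) := by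
  intro bl
  induction bl with
  | nil =>
    intro d hc
    constructor
    · rfl
    · intro c'
      by_cases h : c' = c <;> simp [h]
  | cons br rest ih =>
    intro d hc
    by_cases hcond : seg.1 + md ≤ br ∧ br < seg.2 - md
    · have hcontains : d.contains c = true := (PySem.Dict.contains_iff_mem_keys d c).mpr hc
      have hk : (d.modify c [] (fun v => v ++ [br])).keys = d.keys := by
        rw [PySem.Dict.keys_modify]
        exact PySem.Dict.keys_insert_of_contains d _ hcontains
      have hc' : c ∈ (d.modify c [] (fun v => v ++ [br])).keys := by rw [hk]; exact hc
      obtain ⟨ihk, ihg⟩ := ih (d.modify c [] (fun v => v ++ [br])) hc'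
      constructor
      · simp only [List.foldl_cons, if_pos hcond]
        rw [ihk, hk]
      · intro c'
        simp only [List.foldl_cons, if_pos hcond]
        rw [ihg c']
        rw [List.filter_cons_of_pos (by simpa using hcond)]
        by_cases h : c' = c
        · simp only [h]
          rw [PySem.Dict.getD_modify]
          simp
        · simp only [h, if_false]
          rw [PySem.Dict.getD_modify]
          simp [h]
    · obtain ⟨ihk, ihg⟩ := ih d hc
      constructor
      · simpa only [List.foldl_cons, if_neg hcond] using ihk
      · intro c'
        simp only [List.foldl_cons, if_neg hcond]
        rw [ihg c', List.filter_cons_of_neg (by simpa using hcond)]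

-- A's middle loop: one chromosome's segments
theorem pv_inner2 (c : String) (md : Int) (bl : List Int) :
    ∀ (slist : List (Int × Int)) (d : PySem.Dict String (List Int)), c ∈ d.keys →
      ((slist.foldl (fun r seg => bl.foldl (fun r br => if seg.1 + md ≤ br ∧ br < seg.2 - md then r.modify c [] (fun v => v ++ [br]) else r) r) d).keys = d.keys
      ∧ ∀ c', (slist.foldl (fun r seg => bl.foldl (fun r br => if seg.1 + md ≤ br ∧ br < seg.2 - md then r.modify c [] (fun v => v ++ [br]) else r) r) d).getD c' []
          = if c' = c then d.getD c [] ++ slist.flatMap (fun seg => bl.filter (fun br => decide (seg.1 + md ≤ br ∧ br < seg.2 - md))) else d.getD c' []) := by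
  intro slist
  induction slist with
  | nil =>
    intro d hc
    refine ⟨rfl, ?_⟩
    intro c'
    by_cases h : c' = c <;> simp [h]
  | cons seg rest ih =>
    intro d hc
    obtain ⟨h1k, h1g⟩ := pv_inner1 c md seg bl d hc
    have hc2 : c ∈ (bl.foldl (fun r br => if seg.1 + md ≤ br ∧ br < seg.2 - md then r.modify c [] (fun v => v ++ [br]) else r) d).keys := by
      rw [h1k]; exact hc
    obtain ⟨ihk, ihg⟩ := ih _ hc2
    constructor
    · simp only [List.foldl_cons]
      rw [ihk, h1k]
    · intro c'
      simp only [List.foldl_cons]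
      rw [ihg c', List.flatMap_cons]
      by_cases h : c' = c
      · simp only [h]
        rw [h1g c, if_pos rfl, List.append_assoc]
        simp
      · simp only [h, if_false]
        rw [h1g c', if_neg h]

-- A's outer loop over the segs dict
theorem pv_outer (breaks : List (String × List Int)) (md : Int) :
    ∀ (l : List (String × List (Int × Int))) (d : PySem.Dict String (List Int)),
      d.keys = breaks.map Prod.fst →
      ((l.foldl (fun res p =>
          if (PySem.Dict.mk breaks).contains p.1 then
            p.2.foldl (fun res seg =>
              ((PySem.Dict.mk breaks).getD p.1 []).foldl (fun res br =>
                if seg.1 + md ≤ br ∧ br < seg.2 - md then res.modify p.1 [] (fun v => v ++ [br]) else res) res) res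
          else res) d).keys = d.keys
      ∧ ∀ c', c' ∈ breaks.map Prod.fst →
          (l.foldl (fun res p =>
            if (PySem.Dict.mk breaks).contains p.1 then
              p.2.foldl (fun res seg =>
                ((PySem.Dict.mk breaks).getD p.1 []).foldl (fun res br =>
                  if seg.1 + md ≤ br ∧ br < seg.2 - md then res.modify p.1 [] (fun v => v ++ [br]) else res) res) res
            else res) d).getD c' []
          = d.getD c' [] ++ (l.filter (fun p => decide (p.1 = c'))).flatMap
              (fun p => p.2.flatMap (fun seg => ((PySem.Dict.mk breaks).getD c' []).filter (fun br => decide (seg.1 + md ≤ br ∧ br < seg.2 - md))))) := by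
  intro l
  induction l with
  | nil =>
    intro d hk
    exact ⟨rfl, fun c' _ => by simp⟩
  | cons p rest ih =>
    intro d hk
    by_cases hc : (PySem.Dict.mk breaks).contains p.1 = true
    · have hpmem : p.1 ∈ breaks.map Prod.fst := by
        rw [PySem.Dict.contains_mk] at hc
        simp only [List.any_eq_true, beq_iff_eq] at hc
        obtain ⟨q, hq, hqe⟩ := hc
        exact List.mem_map.mpr ⟨q, hq, hqe⟩
      have hpd : p.1 ∈ d.keys := by rw [hk]; exact hpmem
      obtain ⟨h2k, h2g⟩ := pv_inner2 p.1 md ((PySem.Dict.mk breaks).getD p.1 []) p.2 d hpd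
      have hk' : (p.2.foldl (fun res seg =>
          ((PySem.Dict.mk breaks).getD p.1 []).foldl (fun res br =>
            if seg.1 + md ≤ br ∧ br < seg.2 - md then res.modify p.1 [] (fun v => v ++ [br]) else res) res) d).keys
          = breaks.map Prod.fst := by rw [h2k, hk]
      obtain ⟨ihk, ihg⟩ := ih _ hk'
      constructor
      · simp only [List.foldl_cons, if_pos hc]
        rw [ihk, h2k]
      · intro c' hc'
        simp only [List.foldl_cons, if_pos hc]
        rw [ihg c' hc', h2g c']
        by_cases h : c' = p.1
        · rw [List.filter_cons_of_pos (by simp [h]), List.flatMap_cons, if_pos h, h, List.append_assoc]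
        · rw [List.filter_cons_of_neg (by simp only [decide_eq_true_eq]; intro hh; exact h hh.symm), if_neg h]
    · have hpnot : p.1 ∉ breaks.map Prod.fst := by
        intro hmem
        apply hc
        rw [PySem.Dict.contains_mk]
        simp only [List.any_eq_true, beq_iff_eq]
        obtain ⟨q, hq, hqe⟩ := List.mem_map.mp hmem
        exact ⟨q, hq, hqe⟩
      obtain ⟨ihk, ihg⟩ := ih d hk
      constructor
      · simpa only [List.foldl_cons, if_neg hc] using ihk
      · intro c' hc'
        simp only [List.foldl_cons, if_neg hc]
        rw [ihg c' hc', List.filter_cons_of_neg (by simp only [decide_eq_true_eq]; intro hh; rw [hh] at hpnot; exact hpnot hc')]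

-- with unique keys, filtering an assoc list by key is the (at most one) dict entry
theorem pv_filter_lookup {β : Type} : ∀ (l : List (String × β)), (l.map Prod.fst).Nodup → ∀ c : String,
    l.filter (fun p => decide (p.1 = c)) = ((PySem.Dict.mk l).get? c).toList.map (fun v => (c, v)) := by
  intro l
  induction l with
  | nil => intro _ c; simp [PySem.Dict.get?]
  | cons kv rest ih =>
    intro hn c
    have hn' : kv.1 ∉ List.map Prod.fst rest ∧ (List.map Prod.fst rest).Nodup := by
      rw [List.map_cons] at hn; exact List.nodup_cons.mp hn
    obtain ⟨hk, hrest⟩ := hn'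
    rw [PySem.Dict.get?_mk_cons]
    by_cases h : kv.1 = c
    · have hbeq : (kv.1 == c) = true := by simp [h]
      rw [List.filter_cons_of_pos (by simp [h])]
      simp only [hbeq, if_pos]
      have : rest.filter (fun p => decide (p.1 = c)) = [] := by
        rw [List.filter_eq_nil_iff]
        intro z hz
        simp only [decide_eq_true_eq]
        intro hzc
        exact hk (by rw [← h, ← hzc] at *; exact List.mem_map.mpr ⟨z, hz, rfl⟩)
      rw [this]
      simp [← h]
    · have hbeq : (kv.1 == c) = false := by simp [h]
      rw [List.filter_cons_of_neg (by simp [h])]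
      simp only [hbeq]
      simp only [Bool.false_eq_true, if_false]
      exact ih hrest c

-- B's per-chromosome output (the zeta-expansion of the loop body of port B)
def pvBOut (segs : List (String × List (Int × Int))) (md : Int) (p : String × List Int) : List Int :=
  let pairs := PySem.List.sorted (p.2.zip (PySem.List.pyRange 0 (p.2.length : Int))) (fun q => q.1)
  let vals := pairs.map (fun q => q.1)
  ((PySem.Dict.mk segs).getD p.1 []).foldl (fun out seg =>
    let l := bisectLeftLoop vals (seg.1 + md) 0 vals.length
    let r := bisectLeftLoop vals (seg.2 - md) 0 vals.length
    let sel := PySem.List.sorted (PySem.List.slice pairs (some (l : Int)) (some (r : Int))) (fun q => q.2)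
    out ++ sel.map (fun q => q.1)) []

theorem pv_items_fold_insert (bs : List (String × List Int)) (f : (String × List Int) → List Int)
    (hb : (bs.map Prod.fst).Nodup) :
    (bs.foldl (fun d p => d.insert p.1 (f p)) PySem.Dict.empty).items = bs.map (fun p => (p.1, f p)) := by
  have h := PySem.Dict.items_foldl_insert_fresh bs Prod.fst f PySem.Dict.empty
    (fun a _ => by simp) hb
  simpa using h

theorem pvBOut_eq (segs : List (String × List (Int × Int))) (md : Int) (p : String × List Int) :
    pvBOut segs md p = ((PySem.Dict.mk segs).getD p.1 []).flatMap
      (fun seg => p.2.filter (fun br => decide (seg.1 + md ≤ br ∧ br < seg.2 - md))) := by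
  show ((PySem.Dict.mk segs).getD p.1 []).foldl (fun out seg =>
      out ++ (PySem.List.sorted
        (PySem.List.slice (PySem.List.sorted (p.2.zip (PySem.List.pyRange 0 (p.2.length : Int))) (fun q => q.1))
          (some ((bisectLeftLoop ((PySem.List.sorted (p.2.zip (PySem.List.pyRange 0 (p.2.length : Int))) (fun q => q.1)).map (fun q => q.1)) (seg.1 + md) 0 ((PySem.List.sorted (p.2.zip (PySem.List.pyRange 0 (p.2.length : Int))) (fun q => q.1)).map (fun q => q.1)).length : Nat) : Int))
          (some ((bisectLeftLoop ((PySem.List.sorted (p.2.zip (PySem.List.pyRange 0 (p.2.length : Int))) (fun q => q.1)).map (fun q => q.1)) (seg.2 - md) 0 ((PySem.List.sorted (p.2.zip (PySem.List.pyRange 0 (p.2.length : Int))) (fun q => q.1)).map (fun q => q.1)).length : Nat) : Int)))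
        (fun q => q.2)).map (fun q => q.1)) []
    = _
  rw [PySem.List.foldl_append_eq_flatMap]
  rw [List.nil_append]
  have hfun : (fun seg : Int × Int =>
      (PySem.List.sorted
        (PySem.List.slice (PySem.List.sorted (p.2.zip (PySem.List.pyRange 0 (p.2.length : Int))) (fun q => q.1))
          (some ((bisectLeftLoop ((PySem.List.sorted (p.2.zip (PySem.List.pyRange 0 (p.2.length : Int))) (fun q => q.1)).map (fun q => q.1)) (seg.1 + md) 0 ((PySem.List.sorted (p.2.zip (PySem.List.pyRange 0 (p.2.length : Int))) (fun q => q.1)).map (fun q => q.1)).length : Nat) : Int))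
          (some ((bisectLeftLoop ((PySem.List.sorted (p.2.zip (PySem.List.pyRange 0 (p.2.length : Int))) (fun q => q.1)).map (fun q => q.1)) (seg.2 - md) 0 ((PySem.List.sorted (p.2.zip (PySem.List.pyRange 0 (p.2.length : Int))) (fun q => q.1)).map (fun q => q.1)).length : Nat) : Int)))
        (fun q => q.2)).map (fun q => q.1))
      = (fun seg : Int × Int => p.2.filter (fun br => decide (seg.1 + md ≤ br ∧ br < seg.2 - md))) := by
    funext seg
    exact pv_sel_eq p.2 (seg.1 + md) (seg.2 - md)
  rw [hfun]

theorem pv_final (segs : List (String × List (Int × Int))) (breaks : List (String × List Int)) (md : Int)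
    (hs : (segs.map Prod.fst).Nodup) (hb : (breaks.map Prod.fst).Nodup) :
    get_breaks_inside_segments segs breaks md = get_breaks_inside_segments_alt segs breaks md := by
  have hB : get_breaks_inside_segments_alt segs breaks md = breaks.map (fun p => (p.1, pvBOut segs md p)) :=
    pv_items_fold_insert breaks (pvBOut segs md) hb
  have hres0 : ((breaks.foldl (fun d p => d.insert p.1 ([] : List Int)) PySem.Dict.empty)).items
      = breaks.map (fun p => (p.1, ([] : List Int))) :=
    pv_items_fold_insert breaks (fun _ => []) hb
  have hres0keys : ((breaks.foldl (fun d p => d.insert p.1 ([] : List Int)) PySem.Dict.empty)).keys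
      = breaks.map Prod.fst := by
    show ((breaks.foldl (fun d p => d.insert p.1 ([] : List Int)) PySem.Dict.empty)).items.map Prod.fst = _
    rw [hres0, List.map_map]
    rfl
  obtain ⟨hfk, hfg⟩ := pv_outer breaks md segs _ hres0keys
  have hkeys : _ = breaks.map Prod.fst := hfk.trans hres0keys
  have hnodup : (segs.foldl (fun res p =>
          if (PySem.Dict.mk breaks).contains p.1 then
            p.2.foldl (fun res seg =>
              ((PySem.Dict.mk breaks).getD p.1 []).foldl (fun res br =>
                if seg.1 + md ≤ br ∧ br < seg.2 - md then res.modify p.1 [] (fun v => v ++ [br]) else res) res) res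
          else res) ((breaks.foldl (fun d p => d.insert p.1 ([] : List Int)) PySem.Dict.empty))).keys.Nodup := by
    rw [hfk, hres0keys]; exact hb
  have hA : get_breaks_inside_segments segs breaks md
      = (breaks.map Prod.fst).map (fun k => (k, (segs.foldl (fun res p =>
          if (PySem.Dict.mk breaks).contains p.1 then
            p.2.foldl (fun res seg =>
              ((PySem.Dict.mk breaks).getD p.1 []).foldl (fun res br =>
                if seg.1 + md ≤ br ∧ br < seg.2 - md then res.modify p.1 [] (fun v => v ++ [br]) else res) res) res
          else res) ((breaks.foldl (fun d p => d.insert p.1 ([] : List Int)) PySem.Dict.empty))).getD k [])) := by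
    show (segs.foldl (fun res p =>
          if (PySem.Dict.mk breaks).contains p.1 then
            p.2.foldl (fun res seg =>
              ((PySem.Dict.mk breaks).getD p.1 []).foldl (fun res br =>
                if seg.1 + md ≤ br ∧ br < seg.2 - md then res.modify p.1 [] (fun v => v ++ [br]) else res) res) res
          else res) ((breaks.foldl (fun d p => d.insert p.1 ([] : List Int)) PySem.Dict.empty))).items = _
    rw [PySem.Dict.items_eq_map_keys _ hnodup ([] : List Int), hkeys]
  rw [hA, hB, List.map_map]
  apply List.map_congr_left
  intro p hp
  simp only [Function.comp]
  congr 1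
  have hpk : p.1 ∈ breaks.map Prod.fst := List.mem_map.mpr ⟨p, hp, rfl⟩
  rw [hfg p.1 hpk]
  have hres0nodup : ((breaks.foldl (fun d p => d.insert p.1 ([] : List Int)) PySem.Dict.empty)).keys.Nodup := by
    rw [hres0keys]; exact hb
  have h0 : ((breaks.foldl (fun d p => d.insert p.1 ([] : List Int)) PySem.Dict.empty)).getD p.1 [] = [] := by
    apply PySem.Dict.getD_of_mem_items _ _ hres0nodup
    rw [hres0]
    exact List.mem_map.mpr ⟨p, hp, rfl⟩
  rw [h0, List.nil_append]
  have hbp : (PySem.Dict.mk breaks).getD p.1 [] = p.2 := by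
    apply PySem.Dict.getD_of_mem_items
    · show (p.1, p.2) ∈ breaks
      simpa using hp
    · show (breaks.map (fun x => x.1)).Nodup
      exact hb
  rw [pv_filter_lookup segs hs p.1]
  rw [pvBOut_eq, hbp]
  cases hget : (PySem.Dict.mk segs).get? p.1 with
  | none =>
    have : (PySem.Dict.mk segs).getD p.1 [] = [] := by
      rw [PySem.Dict.getD_eq_get?_getD, hget]; rfl
    simp [this]
  | some sl =>
    have : (PySem.Dict.mk segs).getD p.1 [] = sl := by
      rw [PySem.Dict.getD_eq_get?_getD, hget]; rfl
    simp [this]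

-- ===== VERDICT (by name: the statement is the Claim_ definition above) =====
theorem get_breaks_inside_segments_spec : Claim_equal_get_breaks_inside_segments := by
  intro segs breaks min_dist _ hpre
  exact pv_final segs breaks min_dist hpre.1 hpre.2
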